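-- pv_equiv track=rewrite | github.com/NikitaZhlbv/programmes | 2.py | silencer
-- ===== SOURCE A (Python) =====
-- def silencer(st):
--     word = ''
--     m = ''
--     m_found = False
--     for k in range(len(st)-1, -1, -1):
--         if st[k] == '!' and not m_found:
--             m = '!'
--             m_found = True
--         elif st[k] == '?' and not m_found:
--             m = '?'
--             m_found = True
--         elif st[k] != '!' and st[k] != '?':
--             word += st[k]
--     word = word[::-1] + m
--     return word
-- ===== SOURCE B (Python) =====
-- def silencer(st):
--     # Two independent forward passes instead of one interleaved backward loop:
--     # pass 1 strips every '!'/'?', pass 2 latches the last '!'/'?' seen.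
--     cleaned = ''.join(c for c in st if c != '!' and c != '?')
--     last = ''
--     for c in st:
--         if c == '!' or c == '?':
--             last = c
--     return cleaned + last
-- ===== Notes on version B (the rewrite author's own statement) =====
-- stated objective: simpler
-- what changed: Replaced A's single backward index loop that interleaves building the reversed kept text with an m_found latch (plus a final string reversal) by two independent forward passes: a filter join for the cleaned text and a simple latch for the last terminal punctuation. (avoids per-character string concatenation and the final reversal).
import Mathlib
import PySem

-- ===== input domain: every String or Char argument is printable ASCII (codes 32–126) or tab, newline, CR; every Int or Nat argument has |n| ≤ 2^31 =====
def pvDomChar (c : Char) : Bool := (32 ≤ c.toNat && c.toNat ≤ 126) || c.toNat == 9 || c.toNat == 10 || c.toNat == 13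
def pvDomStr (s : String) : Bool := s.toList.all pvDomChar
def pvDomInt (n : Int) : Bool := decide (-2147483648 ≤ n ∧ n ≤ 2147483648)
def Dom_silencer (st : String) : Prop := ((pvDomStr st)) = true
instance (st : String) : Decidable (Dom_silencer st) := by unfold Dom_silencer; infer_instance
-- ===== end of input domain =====

-- B is simpler: two independent forward passes (filter + last-punctuation latch) instead of
-- A's single backward index loop with an m_found latch and a final reversal.

-- ===== PORT A =====
-- one loop step of A: state is (word, m, m_found)
def silStepA (acc : List Char × List Char × Bool) (c : Char) :
    List Char × List Char × Bool :=
  if c = '!' ∧ acc.2.2 = false then (acc.1, ['!'], true)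
  else if c = '?' ∧ acc.2.2 = false then (acc.1, ['?'], true)
  else if c ≠ '!' ∧ c ≠ '?' then (acc.1 ++ [c], acc.2.1, acc.2.2)
  else acc

def silencer (st : String) : String :=
  let cs := st.toList
  -- for k in range(len(st)-1, -1, -1): … st[k] … (k is always in range)
  let r := (PySem.List.pyRange (PySem.Str.len st - 1) (-1) (-1)).foldl
    (fun acc k => silStepA acc (PySem.List.pyGetD cs k ' ')) ([], [], false)
  -- word[::-1] + m : s[::-1] is reverse (PySem.List.slice?_none_none_neg_one)
  String.ofList (r.1.reverse ++ r.2.1)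

-- ===== PORT B =====
def silencer_alt (st : String) : String :=
  let cs := st.toList
  -- pass 1: ''.join(c for c in st if c != '!' and c != '?')
  let cleaned := cs.filter (fun c => c != '!' && c != '?')
  -- pass 2: latch the last '!'/'?'
  let last := cs.foldl (fun (l : List Char) c => if c = '!' ∨ c = '?' then [c] else l) []
  String.ofList (cleaned ++ last)

-- ===== PRECONDITION & SPEC =====
def Spec_silencer (st : String) (out : String) : Prop := out = silencer_alt st
instance (st : String) (out : String) : Decidable (Spec_silencer st out) := by unfold Spec_silencer; infer_instance

-- ===== CLAIM (what is proved, stated in full; the proofs are below) =====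
def Claim_equal_silencer : Prop := ∀ (st : String), Dom_silencer st → Spec_silencer st (silencer st)

-- ===== LEMMAS AND PROOFS =====

def keepC (c : Char) : Bool := c != '!' && c != '?'

def bangP (c : Char) : Bool := c == '!' || c == '?'

def firstBang (l : List Char) : List Char :=
  match l.find? bangP with
  | some c => [c]
  | none => []

theorem foldA_true (rs : List Char) (w m : List Char) :
    rs.foldl silStepA (w, m, true) = (w ++ rs.filter keepC, m, true) := by
  induction rs generalizing w with
  | nil => simp
  | cons c t ih =>
    by_cases h : keepC c = true
    · have h1 : c ≠ '!' ∧ c ≠ '?' := by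
        simp [keepC] at h; exact ⟨h.1, h.2⟩
      simp [List.foldl_cons, silStepA, h1.1, h1.2, ih, h]
    · have h1 : ¬(c ≠ '!' ∧ c ≠ '?') := by
        simp [keepC] at h ⊢; intro hb; exact h hb
      simp [List.foldl_cons, silStepA, h1, ih, h]

theorem foldA_false (rs : List Char) (w : List Char) :
    rs.foldl silStepA (w, [], false) =
      (w ++ rs.filter keepC, firstBang rs, rs.any bangP) := by
  induction rs generalizing w with
  | nil => simp [firstBang]
  | cons c t ih =>
    by_cases hb : bangP c = true
    · have hc : c = '!' ∨ c = '?' := by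
        simp [bangP] at hb; exact hb
      have hk : keepC c = false := by
        rcases hc with h | h <;> simp [keepC, h]
      rcases hc with h | h <;> subst h <;>
        simp [List.foldl_cons, silStepA, foldA_true, firstBang, List.find?,
          hk, bangP]
    · have hc : c ≠ '!' ∧ c ≠ '?' := by
        simp [bangP] at hb; exact ⟨hb.1, hb.2⟩
      have hk : keepC c = true := by simp [keepC, hc.1, hc.2]
      simp [List.foldl_cons, silStepA, hc.1, hc.2, ih, firstBang, List.find?,
        hk, hb]

theorem latch_eq (l : List Char) (acc : List Char) :
    l.foldl (fun (l : List Char) c => if c = '!' ∨ c = '?' then [c] else l) acc =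
      (match l.reverse.find? bangP with
       | some c => [c]
       | none => acc) := by
  induction l generalizing acc with
  | nil => simp
  | cons c t ih =>
    rw [List.foldl_cons, ih]
    have : (c :: t).reverse.find? bangP = (t.reverse.find? bangP).or ([c].find? bangP) := by
      simp [List.find?_append]
    rw [this]
    cases hf : t.reverse.find? bangP with
    | some d => simp
    | none =>
      by_cases hb : c = '!' ∨ c = '?'
      · have : bangP c = true := by rcases hb with h | h <;> simp [bangP, h]
        simp [hb, List.find?, this]
      · have : bangP c = false := by
          simp only [not_or] at hb; simp [bangP, hb.1, hb.2]
        simp [hb, List.find?, this]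

theorem filter_eq (cs : List Char) :
    cs.filter (fun c => c != '!' && c != '?') = cs.filter keepC := rfl

theorem silencer_eq (st : String) : silencer st = silencer_alt st := by
  have hrange : PySem.List.pyRange (PySem.Str.len st - 1) (-1) (-1)
      = (PySem.List.pyRange 0 (PySem.Str.len st) 1).reverse := by
    rw [PySem.List.pyRange_neg_one_eq_reverse]
    norm_num
  have hmap : ((PySem.List.pyRange 0 (PySem.Str.len st) 1).map
      (fun j => PySem.List.pyGetD st.toList j ' ')) = st.toList := by
    simpa [PySem.Str.len] using
      PySem.List.map_pyGetD_pyRange_zero (xs := st.toList) (d := ' ')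
  have hfold : (PySem.List.pyRange (PySem.Str.len st - 1) (-1) (-1)).foldl
      (fun acc k => silStepA acc (PySem.List.pyGetD st.toList k ' '))
      (([], [], false) : List Char × List Char × Bool)
      = st.toList.reverse.foldl silStepA ([], [], false) := by
    rw [hrange, ← List.foldl_map, List.map_reverse, hmap]
  simp only [silencer, silencer_alt, hfold, foldA_false, latch_eq]
  simp only [List.nil_append, List.filter_reverse, List.reverse_reverse, filter_eq]
  cases hf : st.toList.reverse.find? bangP with
  | some d => simp [firstBang, hf]
  | none => simp [firstBang, hf]

-- ===== VERDICT (by name: the statement is the Claim_ definition above) =====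
theorem silencer_spec : Claim_equal_silencer := by
  intro st _
  unfold Spec_silencer
  exact silencer_eq st
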